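-- pv_equiv track=rewrite | github.com/temeddix/interview-practice | baekjoon/1450.py | count_possible_sums
-- ===== SOURCE A (Python) =====
-- def count_possible_sums(items: list[int], capacity: int) -> list[int]:
--     if not items:
--         return [0]
--
--     first_item = items[0]
--     possible_sums: list[int] = []
--
--     new_sums = count_possible_sums(items[1:], capacity)
--     possible_sums.extend(new_sums)
--     for new_sum in new_sums:
--         added_sum = new_sum + first_item
--         if added_sum <= capacity:
--             possible_sums.append(added_sum)
--
--     return possible_sums
-- ===== SOURCE B (Python) =====
-- def count_possible_sums(items: list[int], capacity: int) -> list[int]: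
--     result = [0]
--     for item in reversed(items):
--         snapshot = list(result)
--         result.extend(s + item for s in snapshot if s + item <= capacity)
--     return result
-- ===== Notes on version B (the rewrite author's own statement) =====
-- stated objective: alternative
-- what changed: Replaced the recursion (suffix-first, list slicing at every level) with an iterative accumulator that loops over reversed(items) and extends the result in place with the filtered item-added sums.
import Mathlib
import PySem

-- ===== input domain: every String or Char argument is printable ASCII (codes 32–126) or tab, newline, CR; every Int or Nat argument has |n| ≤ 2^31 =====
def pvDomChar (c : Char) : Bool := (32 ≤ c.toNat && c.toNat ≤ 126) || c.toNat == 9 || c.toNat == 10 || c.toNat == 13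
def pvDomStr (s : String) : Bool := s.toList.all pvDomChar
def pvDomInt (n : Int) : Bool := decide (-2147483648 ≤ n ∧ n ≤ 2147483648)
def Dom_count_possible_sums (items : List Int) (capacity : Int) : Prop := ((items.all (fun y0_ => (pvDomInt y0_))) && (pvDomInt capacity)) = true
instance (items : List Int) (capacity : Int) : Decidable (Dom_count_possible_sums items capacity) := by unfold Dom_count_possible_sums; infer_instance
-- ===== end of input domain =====

-- B replaces A's recursion by an iterative accumulator looping over reversed(items); alternative decomposition, same output.

-- ===== PORT A =====
def count_possible_sums (items : List Int) (capacity : Int) : List Int :=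
  match items with
  | [] => [0]
  | first_item :: rest =>
    let new_sums := count_possible_sums rest capacity
    let possible_sums := new_sums
    -- for new_sum in new_sums: append new_sum + first_item if ≤ capacity
    possible_sums ++ (new_sums.foldl (fun acc new_sum =>
      let added_sum := new_sum + first_item
      if added_sum ≤ capacity then acc ++ [added_sum] else acc) [])

-- ===== PORT B =====
def count_possible_sums_alt (items : List Int) (capacity : Int) : List Int :=
  items.reverse.foldl (fun result item =>
    let snapshot := result
    result ++ (snapshot.filterMap (fun s =>
      if s + item ≤ capacity then some (s + item) else none))) [0]

-- ===== PRECONDITION & SPEC =====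
def Spec_count_possible_sums (items : List Int) (capacity : Int) (out : List Int) : Prop := out = count_possible_sums_alt items capacity
instance (items : List Int) (capacity : Int) (out : List Int) : Decidable (Spec_count_possible_sums items capacity out) := by unfold Spec_count_possible_sums; infer_instance

-- ===== CLAIM (what is proved, stated in full; the proofs are below) =====
def Claim_equal_count_possible_sums : Prop := ∀ (items : List Int) (capacity : Int), Dom_count_possible_sums items capacity → Spec_count_possible_sums items capacity (count_possible_sums items capacity)

-- ===== LEMMAS AND PROOFS =====

-- A's inner for-loop (fold appending singletons) equals a filterMap.
theorem pv_inner_eq_filterMap (c x : Int) (l acc : List Int) :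
    l.foldl (fun acc new_sum =>
      let added_sum := new_sum + x
      if added_sum ≤ c then acc ++ [added_sum] else acc) acc
    = acc ++ l.filterMap (fun s => if s + x ≤ c then some (s + x) else none) := by
  induction l generalizing acc with
  | nil => simp
  | cons h t ih =>
    simp only [List.foldl_cons, List.filterMap_cons]
    by_cases hc : h + x ≤ c
    · simp [hc, ih]
    · simp [hc, ih]

theorem pv_eq (items : List Int) (capacity : Int) :
    count_possible_sums items capacity = count_possible_sums_alt items capacity := by
  induction items with
  | nil => rfl
  | cons x rest ih =>
    simp only [count_possible_sums, count_possible_sums_alt, List.reverse_cons,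
      List.foldl_append, List.foldl_cons, List.foldl_nil] at *
    rw [pv_inner_eq_filterMap, ih, List.nil_append]

-- ===== VERDICT (by name: the statement is the Claim_ definition above) =====
theorem count_possible_sums_spec : Claim_equal_count_possible_sums := by
  intro items capacity _
  exact pv_eq items capacity
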